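-- pv_equiv track=rewrite | github.com/Zimetrics-training/python-beginner-assignment-yash2316 | src/number_categorizer.py | categorize_numbers
-- ===== SOURCE A (Python) =====
-- from typing import List
--
-- def is_prime(num: int) -> bool:
--     # Your code to check if a number is prime
--     if num <= 1:
--         return False
--
--     for i in range(2,int(num**0.5) + 1):
--         if num%i == 0:
--             return False
--
--     return True
--
-- def is_perfect(num: int) -> bool:
--     # Your code to check if a number is perfect
--     if num <= 1:
--         return False
--
--     sum_of_divisors = 1
--
--     for i in range(2,num//2 + 1):
--         if num%i == 0:
--             sum_of_divisors += i
--
--     return sum_of_divisors == num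
--
-- def categorize_numbers(nums: List[int]) -> List[str]:
--     result = []
--     for num in nums:
--         # Your code to categorize each number based on the conditions
--         res = ""
--         if num < 0:
--             res += "negative"
--         elif num > 0:
--             res += "positive"
--         else:
--             res += "zero"
--
--         if num%2 == 0:
--             res += ", even"
--         else:
--             res+= ", odd"
--
--         if num > 0 and is_prime(num):
--             res += ", prime"
--
--         if num > 0 and is_perfect(num):
--             res += ", perfect"
--
--         result.append(res)
--
--
--
--     return result
-- ===== SOURCE B (Python) =====
-- from typing import List
--
-- def _sigma(n: int) -> int:
--     # Sum of ALL divisors of n (n >= 1), found in O(sqrt n) by pairing d with n // d.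
--     s = 0
--     i = 1
--     while i * i <= n:
--         if n % i == 0:
--             s += i
--             j = n // i
--             if j != i:
--                 s += j
--         i += 1
--     return s
--
-- def categorize_numbers(nums: List[int]) -> List[str]:
--     result = []
--     for num in nums:
--         parts = ["negative" if num < 0 else "positive" if num > 0 else "zero",
--                  "even" if num % 2 == 0 else "odd"]
--         if num > 1:
--             s = _sigma(num)
--             if s == num + 1:          # only divisors are 1 and num  -> prime
--                 parts.append("prime")
--             if s == 2 * num:          # proper divisors sum to num   -> perfect
--                 parts.append("perfect")
--         result.append(", ".join(parts))
--     return result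
-- ===== Notes on version B (the rewrite author's own statement) =====
-- stated objective: faster
-- what changed: Replaces A's O(n) trial sum to n//2 for the perfect test (and the separate prime loop) by one O(sqrt n) paired-divisor sum sigma(n), deciding prime via sigma=n+1 and perfect via sigma=2n.
import Mathlib
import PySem

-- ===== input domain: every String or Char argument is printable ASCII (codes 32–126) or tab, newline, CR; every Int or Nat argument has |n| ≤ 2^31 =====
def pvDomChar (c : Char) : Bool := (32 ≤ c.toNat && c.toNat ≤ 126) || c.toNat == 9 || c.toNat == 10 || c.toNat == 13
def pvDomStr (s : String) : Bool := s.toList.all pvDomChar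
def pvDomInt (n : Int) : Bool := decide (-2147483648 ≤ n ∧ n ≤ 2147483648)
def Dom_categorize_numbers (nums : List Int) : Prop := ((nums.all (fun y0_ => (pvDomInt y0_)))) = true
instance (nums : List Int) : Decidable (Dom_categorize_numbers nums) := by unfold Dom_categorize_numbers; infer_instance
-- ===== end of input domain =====

-- B replaces A's O(n) trial sum to n//2 (plus a separate prime loop) by one O(√n) paired-divisor
-- sum σ(n), deciding prime via σ(n) = n+1 and perfect via σ(n) = 2n; objective: faster (asymptotic).

-- ===== PORT A =====
-- int(num**0.5) is ported as Nat.sqrt num.toNat: exact for 0 ≤ num ≤ 2^31 (checked against CPython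
-- on the stated domain; the loop is only reached for num ≥ 2).
def pv_is_prime (num : Int) : Bool :=
  if num ≤ 1 then false
  else
    -- 'for i in range(2, int(num**0.5)+1): if num%i==0: return False' then 'return True'
    (PySem.List.pyRange 2 ((Nat.sqrt num.toNat : Int) + 1) 1).all
      (fun i => !(PySem.Int.mod num i == 0))

def pv_is_perfect (num : Int) : Bool :=
  if num ≤ 1 then false
  else
    let sum_of_divisors :=
      (PySem.List.pyRange 2 (PySem.Int.floordiv num 2 + 1) 1).foldl
        (fun s i => if PySem.Int.mod num i == 0 then s + i else s) 1
    sum_of_divisors == num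

def pv_categorize_one (num : Int) : String :=
  let res := if num < 0 then "negative" else if num > 0 then "positive" else "zero"
  let res := if PySem.Int.mod num 2 == 0 then res ++ ", even" else res ++ ", odd"
  let res := if num > 0 && pv_is_prime num then res ++ ", prime" else res
  let res := if num > 0 && pv_is_perfect num then res ++ ", perfect" else res
  res

def categorize_numbers (nums : List Int) : List String :=
  nums.foldl (fun result num => result ++ [pv_categorize_one num]) []

-- ===== PORT B =====
-- 'while i * i <= n' loop of _sigma, accumulating i and the paired divisor n // i
def pv_sigma_loop (n : Int) (i : Int) (s : Int) : Int :=
  if h : i * i ≤ n then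
    let s' := if PySem.Int.mod n i == 0 then
                let j := PySem.Int.floordiv n i
                if j ≠ i then s + i + j else s + i
              else s
    pv_sigma_loop n (i + 1) s'
  else s
  termination_by (n + 1 - i).toNat
  decreasing_by
    have hi : i ≤ n := by
      by_cases h0 : i ≤ 0
      · exact le_trans h0 (le_trans (mul_self_nonneg i) h)
      · nlinarith
    omega

def pv_sigma (n : Int) : Int := pv_sigma_loop n 1 0

def pv_categorize_one_alt (num : Int) : String :=
  let parts := [if num < 0 then "negative" else if num > 0 then "positive" else "zero",
                if PySem.Int.mod num 2 == 0 then "even" else "odd"]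
  let parts := if num > 1 then
      let s := pv_sigma num
      (parts ++ (if s == num + 1 then ["prime"] else []))
        ++ (if s == 2 * num then ["perfect"] else [])
    else parts
  PySem.Str.join ", " parts

def categorize_numbers_alt (nums : List Int) : List String :=
  nums.foldl (fun result num => result ++ [pv_categorize_one_alt num]) []

-- ===== PRECONDITION & SPEC =====
def Spec_categorize_numbers (nums : List Int) (out : List String) : Prop := out = categorize_numbers_alt nums
instance (nums : List Int) (out : List String) : Decidable (Spec_categorize_numbers nums out) := by unfold Spec_categorize_numbers; infer_instance

-- ===== CLAIM (what is proved, stated in full; the proofs are below) =====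
def Claim_equal_categorize_numbers : Prop := ∀ (nums : List Int), Dom_categorize_numbers nums → Spec_categorize_numbers nums (categorize_numbers nums)

-- ===== LEMMAS AND PROOFS =====

-- B's loop from counter k accumulates the "paired divisor" sum over i ∈ [k, √m]
def pvPairSum (m k : Nat) : Nat :=
  ∑ i ∈ Finset.Ico k (Nat.sqrt m + 1), (if i ∣ m then i + (if m / i ≠ i then m / i else 0) else 0)

lemma cofactor_large (m i : Nat) (hm : 1 ≤ m) (hi : i ∣ m) (h1 : 1 ≤ i)
    (hle : i ≤ Nat.sqrt m) (hne : m / i ≠ i) : Nat.sqrt m < m / i := by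
  by_contra hc
  rw [not_lt] at hc
  have hq1 : 1 ≤ m / i := Nat.one_le_div_iff (by omega) |>.mpr (Nat.le_of_dvd hm hi)
  set a := Nat.sqrt m with ha
  have hmul2 : i * (m / i) = m := Nat.mul_div_cancel' hi
  have hs : a * a ≤ m := by have := Nat.sqrt_le' m; rw [pow_two] at this; exact this
  have ha1 : 1 ≤ a := le_trans h1 hle
  have hcase : i < a ∨ m / i < a := by omega
  have hlt : i * (m / i) < a * a := by
    rcases hcase with h | h
    · calc i * (m / i) ≤ (a-1) * a := Nat.mul_le_mul (by omega) hc
        _ < a * a := Nat.mul_lt_mul_of_lt_of_le (by omega) (le_refl a) (by omega)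
    · calc i * (m / i) ≤ a * (a-1) := Nat.mul_le_mul hle (by omega)
        _ < a * a := Nat.mul_lt_mul_of_le_of_lt (le_refl a) (by omega) (by omega)
  rw [hmul2] at hlt
  exact lt_irrefl m (lt_of_lt_of_le hlt hs)

lemma large_cofactor_small (m d : Nat) (_hm : 1 ≤ m) (hd : d ∣ m) (hlt : Nat.sqrt m < d) :
    m / d ≤ Nat.sqrt m := by
  by_contra hc
  rw [not_le] at hc
  have hmul : d * (m / d) = m := Nat.mul_div_cancel' hd
  have := Nat.lt_succ_sqrt m
  nlinarith

lemma pv_sigma_loop_eq (m : Nat) :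
    ∀ d k, Nat.sqrt m + 1 - k = d → 1 ≤ k → ∀ s : Int,
      pv_sigma_loop (m : Int) (k : Int) s = s + (pvPairSum m k : Int) := by
  intro d
  induction d with
  | zero =>
    intro k hk hk1 s
    have hlt : m < k * k := Nat.sqrt_lt.mp (by omega)
    rw [pv_sigma_loop, dif_neg (by exact_mod_cast not_le.mpr (by exact_mod_cast hlt))]
    have : Finset.Ico k (Nat.sqrt m + 1) = ∅ := Finset.Ico_eq_empty (by omega)
    simp [pvPairSum, this]
  | succ d ih =>
    intro k hk hk1 s
    have hks : k ≤ Nat.sqrt m := by omega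
    have hkk : k * k ≤ m := Nat.le_sqrt.mp hks
    have hsum : pvPairSum m k =
        (if k ∣ m then k + (if m / k ≠ k then m / k else 0) else 0) + pvPairSum m (k+1) := by
      unfold pvPairSum
      rw [Finset.sum_eq_sum_Ico_succ_bot (by omega)]
    rw [pv_sigma_loop, dif_pos (by exact_mod_cast hkk)]
    simp only [PySem.Int.mod_natCast, PySem.Int.floordiv_natCast, beq_iff_eq,
      Nat.cast_eq_zero, ← Nat.dvd_iff_mod_eq_zero, ne_eq, Nat.cast_inj]
    have hrec : ((k : Int) + 1) = ((k + 1 : Nat) : Int) := by push_cast; ring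
    rw [hrec, ih (k+1) (by omega) (by omega), hsum]
    by_cases h1 : k ∣ m
    · by_cases h2 : m / k = k
      · simp only [h1, h2, if_pos, ne_eq, not_true_eq_false, if_false]
        push_cast
        ring
      · simp only [h1, h2, ne_eq, not_false_eq_true, if_pos]
        push_cast
        ring
    · simp only [h1, if_false]
      push_cast
      ring


lemma pvPairSum_eq_sigma (m : Nat) (hm : 1 ≤ m) :
    pvPairSum m 1 = ∑ d ∈ m.divisors, d := by
  unfold pvPairSum
  have hsplit : ∀ i ∈ Finset.Ico 1 (Nat.sqrt m + 1),
      (if i ∣ m then i + (if m / i ≠ i then m / i else 0) else 0)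
        = (if i ∣ m then i else 0) + (if i ∣ m ∧ m / i ≠ i then m / i else 0) := by
    intro i _; split_ifs <;> simp_all
  rw [Finset.sum_congr rfl hsplit, Finset.sum_add_distrib,
    ← Finset.sum_filter_add_sum_filter_not m.divisors (fun d => d ≤ Nat.sqrt m)]
  congr 1
  · -- small divisors: the first component of the paired sum
    rw [← Finset.sum_filter]
    apply Finset.sum_congr _ (fun _ _ => rfl)
    ext x
    simp only [Finset.mem_filter, Finset.mem_Ico, Nat.mem_divisors]
    constructor
    · rintro ⟨⟨hx1, _⟩, hxd⟩
      exact ⟨⟨hxd, by omega⟩, by omega⟩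
    · rintro ⟨⟨hxd, _⟩, hxle⟩
      have hx1 : 1 ≤ x := Nat.pos_of_dvd_of_pos hxd (by omega)
      exact ⟨⟨by omega, by omega⟩, hxd⟩
  · -- large divisors: each is m / i for a unique small divisor i with m / i ≠ i
    rw [← Finset.sum_filter]
    refine Finset.sum_nbij' (fun a => m / a) (fun b => m / b) ?_ ?_ ?_ ?_ ?_
    · intro a ha
      simp only [Finset.mem_filter, Finset.mem_Ico] at ha
      obtain ⟨⟨ha1, ha2⟩, had, hane⟩ := ha
      simp only [Finset.mem_filter, Nat.mem_divisors, not_le]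
      exact ⟨⟨Nat.div_dvd_of_dvd had, by omega⟩,
        cofactor_large m a hm had ha1 (by omega) hane⟩
    · intro b hb
      simp only [Finset.mem_filter, Nat.mem_divisors, not_le] at hb
      obtain ⟨⟨hbd, _⟩, hblt⟩ := hb
      simp only [Finset.mem_filter, Finset.mem_Ico]
      have hb1 : 1 ≤ b := Nat.pos_of_dvd_of_pos hbd (by omega)
      have hble : m / b ≤ Nat.sqrt m := large_cofactor_small m b hm hbd hblt
      have hq1 : 1 ≤ m / b := Nat.one_le_div_iff (by omega) |>.mpr (Nat.le_of_dvd hm hbd)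
      have hdd : m / (m / b) = b := Nat.div_div_self hbd (by omega)
      refine ⟨⟨by omega, by omega⟩, Nat.div_dvd_of_dvd hbd, ?_⟩
      rw [hdd]; omega
    · intro a ha
      simp only [Finset.mem_filter, Finset.mem_Ico] at ha
      exact Nat.div_div_self ha.2.1 (by omega)
    · intro b hb
      simp only [Finset.mem_filter, Nat.mem_divisors] at hb
      exact Nat.div_div_self hb.1.1 (by omega)
    · intro a _; rfl


lemma pv_sigma_eq (m : Nat) (hm : 1 ≤ m) :
    pv_sigma (m : Int) = ((∑ d ∈ m.divisors, d : Nat) : Int) := by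
  have := pv_sigma_loop_eq m (Nat.sqrt m + 1 - 1) 1 rfl le_rfl 0
  simp only [pv_sigma, Nat.cast_one] at this ⊢
  rw [this, pvPairSum_eq_sigma m hm]; ring

lemma pv_is_prime_eq (m : Nat) (hm : 2 ≤ m) :
    pv_is_prime (m : Int) = decide (Nat.Prime m) := by
  unfold pv_is_prime
  rw [if_neg (by omega), Bool.eq_iff_iff]
  simp only [Int.toNat_natCast, List.all_eq_true, PySem.List.mem_pyRange_one,
    decide_eq_true_eq, Bool.not_eq_eq_eq_not, Bool.not_true, beq_eq_false_iff_ne, ne_eq,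
    PySem.Int.mod_eq_zero_iff_dvd]
  constructor
  · intro hall
    refine Nat.prime_def_le_sqrt.mpr ⟨hm, fun j h2 hle => ?_⟩
    intro hdvd
    exact hall (j : Int) ⟨by exact_mod_cast h2, by omega⟩
      (by exact_mod_cast hdvd)
  · intro hp i hi hdvd
    obtain ⟨h2, hlt⟩ := hi
    have hnn : i = ((i.toNat : Nat) : Int) := by omega
    refine Nat.prime_def_le_sqrt.mp hp |>.2 i.toNat (by omega) (by omega) ?_
    rw [hnn] at hdvd
    exact_mod_cast hdvd

-- proper divisors other than 1 all lie in [2, m/2]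
lemma properSum_eq (m : Nat) (hm : 2 ≤ m) :
    1 + ∑ i ∈ Finset.Ico 2 (m / 2 + 1), (if i ∣ m then i else 0)
      = ∑ d ∈ m.properDivisors, d := by
  have h1 : ∑ d ∈ m.properDivisors, d
      = ∑ i ∈ Finset.Ico 1 m, (if i ∣ m then i else 0) := by
    rw [← Finset.sum_filter]; rfl
  have h2 : ∑ i ∈ Finset.Ico 2 (m / 2 + 1), (if i ∣ m then i else 0)
      = ∑ i ∈ Finset.Ico 2 m, (if i ∣ m then i else 0) := by
    apply Finset.sum_subset
    · apply Finset.Ico_subset_Ico le_rfl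
      omega
    · intro i hi hni
      simp only [Finset.mem_Ico] at hi hni
      rw [if_neg]
      intro hdvd
      have hmul : i * (m / i) = m := Nat.mul_div_cancel' hdvd
      have hq : 2 ≤ m / i := by
        have h1 : 1 ≤ m / i := Nat.one_le_div_iff (by omega) |>.mpr (by omega)
        rcases Nat.lt_or_ge (m / i) 2 with h | h
        · have he : m / i = 1 := by omega
          rw [he, Nat.mul_one] at hmul
          omega
        · exact h
      have : i * 2 ≤ m := le_trans (Nat.mul_le_mul_left i hq) (le_of_eq hmul)
      have : i ≤ m / 2 := Nat.le_div_iff_mul_le (by omega) |>.mpr this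
      omega
  rw [h1, Finset.sum_eq_sum_Ico_succ_bot (show 1 < m by omega), if_pos (Nat.one_dvd m), h2]

lemma pv_sum_map_range (n : Nat) (f : Nat → Int) :
    ((List.range n).map f).sum = ∑ i ∈ Finset.range n, f i := by
  induction n with
  | zero => rfl
  | succ n ih =>
    rw [List.range_succ, List.map_append, List.sum_append, Finset.sum_range_succ, ih]
    simp

lemma pv_is_perfect_eq (m : Nat) (hm : 2 ≤ m) :
    pv_is_perfect (m : Int) = decide ((∑ d ∈ m.properDivisors, d) = m) := by
  unfold pv_is_perfect
  rw [if_neg (by omega)]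
  have hfun : (fun (s i : Int) => if PySem.Int.mod (m : Int) i == 0 then s + i else s)
      = (fun s i => s + (if PySem.Int.mod (m : Int) i == 0 then i else 0)) := by
    funext s i; split_ifs <;> simp
  rw [hfun, PySem.List.foldl_add]
  have hb : PySem.Int.floordiv (m : Int) 2 = ((m / 2 : Nat) : Int) := by
    rw [show (2:Int) = ((2:Nat):Int) from rfl, PySem.Int.floordiv_natCast]
  rw [hb, PySem.List.pyRange_one]
  have hn : (((m / 2 : Nat) : Int) + 1 - 2).toNat = m / 2 - 1 := by omega
  rw [hn, List.map_map, pv_sum_map_range]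
  simp only [Function.comp_def]
  have hpt : ∀ k : Nat, (if PySem.Int.mod (m : Int) (2 + (k : Int)) == 0
        then 2 + (k : Int) else 0)
      = (((if (2 + k) ∣ m then 2 + k else 0 : Nat)) : Int) := by
    intro k
    have hck : (2 + (k : Int)) = (((2 + k : Nat)) : Int) := by push_cast; ring
    rw [hck, PySem.Int.mod_natCast]
    by_cases hd : (2 + k) ∣ m
    · have h0 : m % (2 + k) = 0 := Nat.dvd_iff_mod_eq_zero.mp hd
      simp [hd, h0]
    · simp only [hd, if_false]
      rw [if_neg, Nat.cast_zero]
      simp only [beq_iff_eq, Nat.cast_eq_zero]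
      intro hc
      exact hd (Nat.dvd_iff_mod_eq_zero.mpr hc)
  simp only [hpt]
  rw [← Nat.cast_sum]
  have hre : ∑ k ∈ Finset.range (m / 2 - 1), (if (2 + k) ∣ m then 2 + k else 0)
      = ∑ i ∈ Finset.Ico 2 (m / 2 + 1), (if i ∣ m then i else 0) := by
    rw [Finset.sum_Ico_eq_sum_range]
    have h21 : m / 2 + 1 - 2 = m / 2 - 1 := by omega
    rw [h21]
  rw [hre, Bool.eq_iff_iff]
  simp only [beq_iff_eq, decide_eq_true_eq]
  have hkey := properSum_eq m hm
  omega

lemma pv_prime_flag (m : Nat) (hm : 2 ≤ m) :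
    (pv_sigma (m : Int) == (m : Int) + 1) = decide (Nat.Prime m) := by
  rw [pv_sigma_eq m (by omega), Bool.eq_iff_iff]
  simp only [beq_iff_eq, decide_eq_true_eq]
  have hsd := Nat.sum_divisors_eq_sum_properDivisors_add_self (n := m)
  rw [show (((∑ d ∈ m.divisors, d : Nat)) : Int) = (m : Int) + 1
      ↔ (∑ d ∈ m.properDivisors, d) = 1 from by omega]
  exact Nat.sum_properDivisors_eq_one_iff_prime

lemma pv_perfect_flag (m : Nat) (hm : 2 ≤ m) :
    (pv_sigma (m : Int) == 2 * (m : Int)) = decide ((∑ d ∈ m.properDivisors, d) = m) := by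
  rw [pv_sigma_eq m (by omega), Bool.eq_iff_iff]
  simp only [beq_iff_eq, decide_eq_true_eq]
  have hsd := Nat.sum_divisors_eq_sum_properDivisors_add_self (n := m)
  omega

lemma categorize_one_eq (num : Int) : pv_categorize_one num = pv_categorize_one_alt num := by
  by_cases h1 : num = 1
  · subst h1; decide
  by_cases hz : num = 0
  · subst hz; decide
  by_cases hneg : num < 0
  · unfold pv_categorize_one pv_categorize_one_alt
    have hng : ¬ num > 0 := by omega
    have hng1 : ¬ num > 1 := by omega
    simp only [if_pos hneg, if_neg hng1, hng, decide_false, Bool.false_and,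
      Bool.false_eq_true, if_false]
    cases hpar : (PySem.Int.mod num 2 == 0) <;> simp <;> try decide
  · -- num ≥ 2
    obtain ⟨m, rfl⟩ : ∃ m : Nat, num = ((m : Nat) : Int) := ⟨num.toNat, by omega⟩
    have hm2 : 2 ≤ m := by omega
    have hprime := pv_is_prime_eq m hm2
    have hperf := pv_is_perfect_eq m hm2
    have b1 := pv_prime_flag m hm2
    have b2 := pv_perfect_flag m hm2
    have c1 : ¬((m : Int) < 0) := by omega
    have c2 : (0 : Int) < (m : Int) := by omega
    have c3 : (1 : Int) < (m : Int) := by omega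
    unfold pv_categorize_one pv_categorize_one_alt
    by_cases hp : Nat.Prime m <;> by_cases hq : (∑ d ∈ m.properDivisors, d) = m <;>
      cases hpar : (PySem.Int.mod (m : Int) 2 == 0) <;>
      simp [hprime, hperf, b1, b2, hp, hq, c1, c3, show 0 < m by omega, show ¬(1 = m) by omega] <;> try decide

theorem categorize_numbers_spec : Claim_equal_categorize_numbers := by
  intro nums _
  unfold Spec_categorize_numbers categorize_numbers categorize_numbers_alt
  rw [PySem.List.foldl_append_singleton_eq_map, PySem.List.foldl_append_singleton_eq_map]
  exact List.map_congr_left (fun x _ => categorize_one_eq x)
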